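-- pv_equiv track=rewrite | github.com/jgfranco/formation | stringSpeedDrill7.py | solution
-- ===== SOURCE A (Python) =====
-- def solution(string1, string2):
--     if string1 == "" and string2 == "": return ""
--     if string1 == "": return string2
--     if string2 == "": return string1
--
--     words1 = string1.split(" ")
--     words2 = string2.split(" ")
--
--     p1 = p2 = 0
--     words3 = []
--     while p1 < len(words1) and p2 < len(words2):
--         words3.append(words1[p1])
--         words3.append(words2[p2])
--         p1 +=1
--         p2 +=1
--
--     while p1 < len(words1) :
--         words3.append(words1[p1])
--         p1 +=1
--
--     while p2 < len(words2) :
--         words3.append(words2[p2])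
--         p2 +=1
--
--     return " ".join(words3)
-- ===== SOURCE B (Python) =====
-- def solution(string1, string2):
--     if string1 == "" and string2 == "": return ""
--     if string1 == "": return string2
--     if string2 == "": return string1
--
--     out = []
--     s1, s2 = string1, string2
--     while True:
--         w, sep, rest = s1.partition(" ")
--         out.append(w)
--         if not sep:
--             out.append(s2)
--             return " ".join(out)
--         s1, s2 = s2, rest
-- ===== Notes on version B (the rewrite author's own statement) =====
-- stated objective: alternative
-- what changed: B never splits the strings into word lists: a single loop peels the first word off the raw string with str.partition(" ") and swaps the two string arguments each step, appending the whole remaining other string when its partner runs out, instead of A's split-then-pointer-merge with two tail-drain loops.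
import Mathlib
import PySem

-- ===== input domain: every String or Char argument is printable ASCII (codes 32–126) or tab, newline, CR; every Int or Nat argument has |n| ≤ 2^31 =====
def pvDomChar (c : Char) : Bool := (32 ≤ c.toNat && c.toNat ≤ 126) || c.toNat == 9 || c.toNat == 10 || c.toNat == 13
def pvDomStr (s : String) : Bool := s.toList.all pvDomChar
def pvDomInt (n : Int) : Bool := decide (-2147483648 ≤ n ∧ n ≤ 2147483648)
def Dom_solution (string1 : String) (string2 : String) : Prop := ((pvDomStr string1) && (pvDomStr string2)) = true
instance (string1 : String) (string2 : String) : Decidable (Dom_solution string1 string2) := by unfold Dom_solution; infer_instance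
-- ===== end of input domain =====

-- B never splits into word lists: one loop peels the first word off the raw string with
-- partition(" ") and swaps the two strings each step (objective: alternative, same cost).

-- ===== PORT A =====
-- A's three while loops: both word lists advance together, then each drains alone
def solMergeA : List (List Char) → List (List Char) → List (List Char)
  | x :: xs, y :: ys => x :: y :: solMergeA xs ys
  | xs, ys => xs ++ ys

def solution (string1 : String) (string2 : String) : String :=
  if string1 = "" ∧ string2 = "" then ""
  else if string1 = "" then string2
  else if string2 = "" then string1
  else
    let words1 := PySem.Chars.splitOn string1.toList [' ']
    let words2 := PySem.Chars.splitOn string2.toList [' ']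
    String.ofList (PySem.Chars.join [' '] (solMergeA words1 words2))

-- ===== PORT B =====
-- the while loop of Source B, arguments swapped each iteration, `out` the accumulator;
-- s1.partition(" ") is ported by hand as takeWhile/dropWhile — exact for a 1-char separator
def solLoopB : List Char → List Char → List (List Char) → List Char
  | s1, s2, out =>
    let w := s1.takeWhile (fun c => c ≠ ' ')
    match h : s1.dropWhile (fun c => c ≠ ' ') with
    | [] => PySem.Chars.join [' '] (out ++ [w] ++ [s2])
    | _ :: rest => solLoopB s2 rest (out ++ [w])
termination_by s1 s2 _ => s1.length + s2.length
decreasing_by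
  have h2 := List.length_dropWhile_le (fun c => c ≠ ' ') s1
  rw [h] at h2
  simp at h2
  omega

def solution_alt (string1 : String) (string2 : String) : String :=
  if string1 = "" ∧ string2 = "" then ""
  else if string1 = "" then string2
  else if string2 = "" then string1
  else String.ofList (solLoopB string1.toList string2.toList [])

-- ===== PRECONDITION & SPEC =====
def Spec_solution (string1 : String) (string2 : String) (out : String) : Prop := out = solution_alt string1 string2
instance (string1 : String) (string2 : String) (out : String) : Decidable (Spec_solution string1 string2 out) := by unfold Spec_solution; infer_instance

-- ===== CLAIM (what is proved, stated in full; the proofs are below) =====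
def Claim_equal_solution : Prop := ∀ (string1 : String) (string2 : String), Dom_solution string1 string2 → Spec_solution string1 string2 (solution string1 string2)

-- ===== LEMMAS AND PROOFS =====

-- pure recursive characterisation of splitOn on a 1-char separator
def solSp : List Char → List (List Char)
  | [] => [[]]
  | c :: rest => if c = ' ' then [] :: solSp rest
                 else (c :: (solSp rest).headI) :: (solSp rest).tail

theorem solSp_ne_nil (s : List Char) : solSp s ≠ [] := by
  cases s with
  | nil => simp [solSp]
  | cons c rest => by_cases h : c = ' ' <;> simp [solSp, h]

theorem splitOn_go_eq (fuel : Nat) : ∀ (l cur : List Char) (acc : List (List Char)),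
    l.length < fuel →
    PySem.Chars.splitOn.go [' '] fuel l cur acc
      = acc.reverse ++ ((cur.reverse ++ (solSp l).headI) :: (solSp l).tail) := by
  induction fuel with
  | zero => intro l cur acc h; omega
  | succ fuel ih =>
    intro l cur acc h
    cases l with
    | nil => simp [PySem.Chars.splitOn.go, solSp]
    | cons c rest =>
      by_cases hc : c = ' '
      · subst hc
        rw [PySem.Chars.splitOn.go]
        simp only [List.isPrefixOf, Bool.and_true, beq_self_eq_true, if_pos]
        simp only [List.length_cons] at h
        simp only [List.length_cons, List.length_nil, List.drop_succ_cons, List.drop_zero]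
        rw [ih rest [] (cur.reverse :: acc) (by omega)]
        have hne := solSp_ne_nil rest
        simp [solSp]
        cases hsp : solSp rest with
        | nil => exact absurd hsp hne
        | cons w ws => simp
      · rw [PySem.Chars.splitOn.go]
        have hpre : [' '].isPrefixOf (c :: rest) = false := by
          simp [List.isPrefixOf]; exact fun hh => hc hh.symm
        rw [hpre]
        simp only [List.length_cons] at h
        simp only [Bool.false_eq_true, if_false]
        rw [ih rest (c :: cur) acc (by omega)]
        simp [solSp, hc]

theorem splitOn_eq_solSp (s : List Char) :
    PySem.Chars.splitOn s [' '] = solSp s := by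
  unfold PySem.Chars.splitOn
  rw [splitOn_go_eq (s.length + 1) s [] [] (by omega)]
  have hne := solSp_ne_nil s
  cases hsp : solSp s with
  | nil => exact absurd hsp hne
  | cons w ws => simp

theorem splitOn_ne_nil (s : List Char) : PySem.Chars.splitOn s [' '] ≠ [] := by
  rw [splitOn_eq_solSp]; exact solSp_ne_nil s

-- splitOn peels off the first word
theorem splitOn_word (s : List Char) :
    PySem.Chars.splitOn s [' ']
      = s.takeWhile (fun c => c ≠ ' ') ::
        (match s.dropWhile (fun c => c ≠ ' ') with
         | [] => []
         | _ :: rest => PySem.Chars.splitOn rest [' ']) := by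
  simp only [splitOn_eq_solSp]
  induction s with
  | nil => simp [solSp]
  | cons c rest ih =>
    by_cases hc : c = ' '
    · subst hc; simp [solSp, List.takeWhile, List.dropWhile]
    · simp only [solSp, if_neg hc]
      rw [ih]
      simp [List.takeWhile, List.dropWhile, hc]

-- join reproduces the string: " ".join(s.split(" ")) == s
theorem join_solSp (s : List Char) : PySem.Chars.join [' '] (solSp s) = s := by
  induction s with
  | nil => exact PySem.Chars.join_singleton [' '] []
  | cons c rest ih =>
    by_cases hc : c = ' '
    · subst hc
      rw [show solSp (' ' :: rest) = [] :: solSp rest from by simp [solSp]]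
      cases hsp : solSp rest with
      | nil => exact absurd hsp (solSp_ne_nil rest)
      | cons w ws =>
        rw [PySem.Chars.join_cons_cons]
        rw [hsp] at ih; rw [ih]; simp
    · simp only [solSp, if_neg hc]
      cases hsp : solSp rest with
      | nil => exact absurd hsp (solSp_ne_nil rest)
      | cons w ws =>
        rw [hsp] at ih
        cases ws with
        | nil =>
          simp only [List.headI, List.tail]
          rw [PySem.Chars.join_singleton]
          rw [PySem.Chars.join_singleton] at ih
          simp [ih]
        | cons q qs =>
          simp only [List.headI, List.tail]
          rw [PySem.Chars.join_cons_cons]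
          rw [PySem.Chars.join_cons_cons] at ih
          simp [← ih]

theorem join_splitOn (s : List Char) :
    PySem.Chars.join [' '] (PySem.Chars.splitOn s [' ']) = s := by
  rw [splitOn_eq_solSp]; exact join_solSp s

-- join only depends on a nonempty suffix through its join
theorem join_congr_suffix (A B : List (List Char)) (hA : A ≠ []) (hB : B ≠ [])
    (h : PySem.Chars.join [' '] A = PySem.Chars.join [' '] B) :
    ∀ out : List (List Char),
      PySem.Chars.join [' '] (out ++ A) = PySem.Chars.join [' '] (out ++ B) := by
  intro out
  induction out with
  | nil => simpa using h
  | cons o out ih =>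
    cases hoA : out ++ A with
    | nil => exact absurd (List.eq_nil_of_append_eq_nil hoA).2 hA
    | cons pa ta =>
      cases hoB : out ++ B with
      | nil => exact absurd (List.eq_nil_of_append_eq_nil hoB).2 hB
      | cons pb tb =>
        simp only [List.cons_append]
        rw [hoA, hoB, PySem.Chars.join_cons_cons, PySem.Chars.join_cons_cons,
            ← hoA, ← hoB, ih]

-- A's merge: taking the head of the first list then swapping the arguments
theorem solMergeA_swap (x : List Char) (xs : List (List Char)) :
    ∀ ys : List (List Char), solMergeA (x :: xs) ys = x :: solMergeA ys xs := by
  induction xs generalizing x with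
  | nil => intro ys; cases ys <;> simp [solMergeA]
  | cons u us ih =>
    intro ys
    cases ys with
    | nil => simp [solMergeA]
    | cons y ys' => simp [solMergeA, ih]

theorem solMergeA_singleton (x : List Char) (ys : List (List Char)) :
    solMergeA [x] ys = x :: ys := by
  cases ys <;> simp [solMergeA]

-- the loop invariant: B's loop computes the join of out ++ A's interleaving
theorem solLoopB_eq (n : Nat) : ∀ (s1 s2 : List Char) (out : List (List Char)),
    s1.length + s2.length ≤ n →
    solLoopB s1 s2 out
      = PySem.Chars.join [' ']
          (out ++ solMergeA (PySem.Chars.splitOn s1 [' ']) (PySem.Chars.splitOn s2 [' '])) := by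
  induction n with
  | zero =>
    intro s1 s2 out h
    have h1 : s1 = [] := by cases s1 with | nil => rfl | cons => simp at h
    have h2 : s2 = [] := by cases s2 with | nil => rfl | cons => simp at h
    subst h1; subst h2
    rw [solLoopB]
    simp [PySem.Chars.splitOn, PySem.Chars.splitOn.go, solMergeA, PySem.Chars.join]
  | succ n ih =>
    intro s1 s2 out h
    rw [solLoopB]
    split
    next hd =>
      -- s1 is a single word: w = s1, append s2 whole
      have hw : s1.takeWhile (fun c => decide (c ≠ ' ')) = s1 := by
        have h2 := List.takeWhile_append_dropWhile (p := fun c => decide (c ≠ ' ')) (l := s1)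
        rw [hd, List.append_nil] at h2
        exact h2
      rw [splitOn_word s1, hd]
      simp only
      rw [hw, solMergeA_singleton, List.append_assoc]
      apply join_congr_suffix
      · simp
      · simp
      · rw [show [s1] ++ [s2] = [s1, s2] from rfl]
        rw [PySem.Chars.join_cons_cons, PySem.Chars.join_singleton]
        cases hsp : PySem.Chars.splitOn s2 [' '] with
        | nil => exact absurd hsp (splitOn_ne_nil s2)
        | cons w ws =>
          rw [PySem.Chars.join_cons_cons]
          have hj := join_splitOn s2
          rw [hsp] at hj
          cases ws with
          | nil =>
            rw [PySem.Chars.join_singleton] at hj ⊢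
            simp [hj]
          | cons q qs =>
            rw [PySem.Chars.join_cons_cons] at hj ⊢
            simp [hj]
    next c rest hd =>
      have hlen : rest.length < s1.length := by
        have h2 := List.length_dropWhile_le (fun c => c ≠ ' ') s1
        rw [hd] at h2; simp at h2; omega
      rw [ih s2 rest (out ++ [s1.takeWhile (fun c => decide (c ≠ ' '))]) (by omega)]
      rw [splitOn_word s1, hd]
      simp only
      rw [solMergeA_swap]
      simp

theorem solLoopB_join (s1 s2 : List Char) :
    solLoopB s1 s2 []
      = PySem.Chars.join [' ']
          (solMergeA (PySem.Chars.splitOn s1 [' ']) (PySem.Chars.splitOn s2 [' '])) := by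
  simpa using solLoopB_eq (s1.length + s2.length) s1 s2 [] le_rfl

-- ===== VERDICT (by name: the statement is the Claim_ definition above) =====
theorem solution_spec : Claim_equal_solution := by
  intro string1 string2 _
  unfold Spec_solution solution solution_alt
  split_ifs <;> simp [solLoopB_join]
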